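-- pv_equiv track=rewrite | github.com/Newell12/CSCI-courses | CSCI/ex28.py | sum_common
-- ===== SOURCE A (Python) =====
-- def sum_common(list1,list2):
--     count = 0
--     if len(list1)==0:
--         return count
--     elif list1[0] in list2:
--         count +=list1[0]
--         list1.pop(0)
--         return count + sum_common(list1,list2)
--     else:
--         list1.pop(0)
--         return count + sum_common(list1,list2)
-- ===== SOURCE B (Python) =====
-- def sum_common(list1, list2):
--     total = 0
--     while list1:
--         x = list1.pop(0)
--         if x in list2:
--             total += x
--     return total
-- ===== Notes on version B (the rewrite author's own statement) =====
-- stated objective: simpler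
-- what changed: Replaces A's non-tail self-recursion (each call pops the head and adds the recursive result) with a single iterative accumulator loop that consumes list1 with pop(0) and adds matching elements to a running total.
import Mathlib
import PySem

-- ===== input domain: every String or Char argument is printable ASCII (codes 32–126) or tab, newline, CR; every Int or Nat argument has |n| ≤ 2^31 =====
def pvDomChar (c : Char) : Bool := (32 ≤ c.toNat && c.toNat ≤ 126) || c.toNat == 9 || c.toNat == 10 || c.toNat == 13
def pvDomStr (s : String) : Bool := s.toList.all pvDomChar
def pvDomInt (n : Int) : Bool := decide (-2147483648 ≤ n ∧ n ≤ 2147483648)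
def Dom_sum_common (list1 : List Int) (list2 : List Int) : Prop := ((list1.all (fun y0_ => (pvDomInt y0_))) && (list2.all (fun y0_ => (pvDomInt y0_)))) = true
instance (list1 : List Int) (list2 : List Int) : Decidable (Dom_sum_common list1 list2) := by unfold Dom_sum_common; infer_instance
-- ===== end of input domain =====

-- ===== PORT A =====
-- A: recursion popping the head of list1; Lean port abstracts the mutation as recursion on the list (equivalence is about the return value; both Pythons empty list1).
def sum_common (list1 : List Int) (list2 : List Int) : Int :=
  match list1 with
  | [] => 0
  | x :: rest =>
      if list2.contains x then
        x + sum_common rest list2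
      else
        0 + sum_common rest list2

-- ===== PORT B =====
-- B: while-loop consuming list1 with an accumulator `total`.
def sumCommonLoop (total : Int) (list1 : List Int) (list2 : List Int) : Int :=
  match list1 with
  | [] => total
  | x :: rest => sumCommonLoop (if list2.contains x then total + x else total) rest list2

def sum_common_alt (list1 : List Int) (list2 : List Int) : Int :=
  sumCommonLoop 0 list1 list2

-- ===== PRECONDITION & SPEC =====
def Spec_sum_common (list1 : List Int) (list2 : List Int) (out : Int) : Prop := out = sum_common_alt list1 list2
instance (list1 : List Int) (list2 : List Int) (out : Int) : Decidable (Spec_sum_common list1 list2 out) := by unfold Spec_sum_common; infer_instance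

-- ===== CLAIM (what is proved, stated in full; the proofs are below) =====
def Claim_equal_sum_common : Prop := ∀ (list1 : List Int) (list2 : List Int), Dom_sum_common list1 list2 → Spec_sum_common list1 list2 (sum_common list1 list2)

-- ===== LEMMAS AND PROOFS =====
theorem sumCommonLoop_eq (list1 : List Int) (list2 : List Int) (total : Int) :
    sumCommonLoop total list1 list2 = total + sum_common list1 list2 := by
  induction list1 generalizing total with
  | nil => simp [sumCommonLoop, sum_common]
  | cons x rest ih =>
      simp only [sumCommonLoop, sum_common]
      split_ifs with h <;> rw [ih] <;> ring

-- ===== VERDICT (by name: the statement is the Claim_ definition above) =====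
theorem sum_common_spec : Claim_equal_sum_common := by
  intro list1 list2 _
  unfold Spec_sum_common sum_common_alt
  rw [sumCommonLoop_eq]
  ring
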